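-- pv_equiv track=rewrite | github.com/aurokin/wowhead_cli | packages/method-cli/src/method_cli/main.py | _query_score
-- ===== SOURCE A (Python) =====
-- def _query_score(query: str, text: str) -> int:
--     if not query or not text:
--         return 0
--     normalized_text = text.lower()
--     score = 0
--     if query in normalized_text:
--         score += 10
--     terms = [term for term in query.split() if term]
--     if terms and all(term in normalized_text for term in terms):
--         score += 6
--     for term in terms:
--         if term in normalized_text:
--             score += 2
--     return score
-- ===== SOURCE B (Python) =====
-- def _query_score(query: str, text: str) -> int:
--     if not query or not text:
--         return 0
--     normalized_text = text.lower()
--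
--     def go(terms, score, all_in):
--         if not terms:
--             return score + (6 if all_in else 0)
--         if terms[0] in normalized_text:
--             return go(terms[1:], score + 2, all_in)
--         return go(terms[1:], score, False)
--
--     terms = query.split()
--     base = 10 if query in normalized_text else 0
--     return go(terms, base, bool(terms))
-- ===== Notes on version B (the rewrite author's own statement) =====
-- stated objective: alternative
-- what changed: Replaces A's three staged passes (all() scan, +6/+10 staging, second scoring for-loop) with one recursive pass over the terms carrying a (score, all-matched) accumulator, adds the +6 only at the end of the recursion, and drops the redundant empty-term filter since str.split() never yields empty tokens.
import Mathlib
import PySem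

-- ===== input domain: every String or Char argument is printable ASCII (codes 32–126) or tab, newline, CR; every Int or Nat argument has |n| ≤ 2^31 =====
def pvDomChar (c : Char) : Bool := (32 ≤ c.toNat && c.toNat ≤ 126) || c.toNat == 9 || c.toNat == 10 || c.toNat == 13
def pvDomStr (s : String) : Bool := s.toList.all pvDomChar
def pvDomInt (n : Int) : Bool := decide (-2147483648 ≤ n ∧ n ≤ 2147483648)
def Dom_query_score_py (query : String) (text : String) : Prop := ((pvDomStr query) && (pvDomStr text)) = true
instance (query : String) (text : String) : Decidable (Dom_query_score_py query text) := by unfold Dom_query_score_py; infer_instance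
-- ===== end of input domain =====

-- B replaces A's staged passes (all() scan, two bonus ifs, second scoring loop) with one
-- recursive pass over the terms carrying a (score, all-matched) accumulator, and drops the
-- redundant empty-term filter (str.split() never yields empty tokens); objective: alternative (same cost).

-- ===== PORT A =====
def query_score_py (query : String) (text : String) : Int :=
  if PySem.Str.len query == 0 || PySem.Str.len text == 0 then 0
  else
    let normalized_text := PySem.Str.lower text
    let score : Int := 0
    let score := if PySem.Str.isIn query normalized_text then score + 10 else score
    let terms := (PySem.Str.split₀ query).filter (fun term => PySem.Str.len term != 0)
    let score := if !terms.isEmpty && terms.all (fun term => PySem.Str.isIn term normalized_text) then score + 6 else score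
    terms.foldl (fun s term => if PySem.Str.isIn term normalized_text then s + 2 else s) score

-- ===== PORT B =====
-- the inner recursive `go` of Source B
def pvGo (nt : String) : List String → Int → Bool → Int
  | [], score, allIn => score + (if allIn then 6 else 0)
  | term :: rest, score, allIn =>
    if PySem.Str.isIn term nt then pvGo nt rest (score + 2) allIn
    else pvGo nt rest score false

def query_score_py_alt (query : String) (text : String) : Int :=
  if PySem.Str.len query == 0 || PySem.Str.len text == 0 then 0
  else
    let normalized_text := PySem.Str.lower text
    let terms := PySem.Str.split₀ query
    let base : Int := if PySem.Str.isIn query normalized_text then 10 else 0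
    pvGo normalized_text terms base (!terms.isEmpty)

-- ===== PRECONDITION & SPEC =====
def Spec_query_score_py (query : String) (text : String) (out : Int) : Prop := out = query_score_py_alt query text
instance (query : String) (text : String) (out : Int) : Decidable (Spec_query_score_py query text out) := by unfold Spec_query_score_py; infer_instance

-- ===== CLAIM (what is proved, stated in full; the proofs are below) =====
def Claim_equal_query_score_py : Prop := ∀ (query : String) (text : String), Dom_query_score_py query text → Spec_query_score_py query text (query_score_py query text)

-- ===== LEMMAS AND PROOFS =====

-- A's scoring loop adds 2 per matching term: fold = start + 2 * (number of matching terms).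
theorem pv_foldl_two (l : List String) (p : String → Bool) (a : Int) :
    l.foldl (fun s t => if p t then s + 2 else s) a = a + 2 * ((l.filter p).length : Int) := by
  induction l generalizing a with
  | nil => simp
  | cons x t ih =>
    by_cases h : p x
    · simp only [List.foldl_cons, if_pos h, List.filter_cons_of_pos h, List.length_cons, ih]
      push_cast; ring
    · simp [h, ih]

-- B's recursive pass in closed form: start + 2 per match, +6 iff the accumulator stays true.
theorem pvGo_eq (nt : String) (l : List String) (score : Int) (allIn : Bool) :
    pvGo nt l score allIn =
      score + 2 * ((l.filter (fun t => PySem.Str.isIn t nt)).length : Int) +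
      (if allIn && l.all (fun t => PySem.Str.isIn t nt) then 6 else 0) := by
  induction l generalizing score allIn with
  | nil => simp [pvGo]
  | cons x rest ih =>
    by_cases h : PySem.Str.isIn x nt = true
    · rw [List.filter_cons_of_pos (by simpa using h)]
      simp only [pvGo, if_pos h, ih, List.all_cons, h, Bool.true_and, List.length_cons]
      split_ifs <;> omega
    · rw [List.filter_cons_of_neg (by simpa using h)]
      simp only [pvGo, if_neg h, ih, List.all_cons]
      have hx : PySem.Chars.isIn x.toList nt.toList = false := by simpa using h
      simp [hx]

-- every token produced by split₀'s worker is nonempty (the invariant on the accumulator)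
theorem pv_go_ne_nil (s : List Char) : ∀ (cur : List Char) (acc : List (List Char)),
    (∀ w ∈ acc, w ≠ []) → ∀ w ∈ PySem.Chars.split₀.go s cur acc, w ≠ [] := by
  induction s with
  | nil =>
    intro cur acc h w hw
    by_cases hc : cur.isEmpty
    · simp only [PySem.Chars.split₀.go, if_pos hc, List.mem_reverse] at hw
      exact h w hw
    · simp only [PySem.Chars.split₀.go, if_neg hc, List.mem_reverse, List.mem_cons] at hw
      rcases hw with hw | hw
      · subst hw; simp only [ne_eq, List.reverse_eq_nil_iff]
        intro hnil; exact hc (by simp [hnil])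
      · exact h w hw
  | cons c rest ih =>
    intro cur acc h w hw
    by_cases hs : PySem.Chars.isspace c
    · by_cases hc : cur.isEmpty
      · simp only [PySem.Chars.split₀.go, if_pos hs, if_pos hc] at hw
        exact ih [] acc h w hw
      · simp only [PySem.Chars.split₀.go, if_pos hs, if_neg hc] at hw
        refine ih [] (cur.reverse :: acc) ?_ w hw
        intro v hv
        rcases List.mem_cons.mp hv with hv | hv
        · subst hv; simp only [ne_eq, List.reverse_eq_nil_iff]
          intro hnil; exact hc (by simp [hnil])
        · exact h v hv
    · simp only [PySem.Chars.split₀.go, if_neg hs] at hw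
      exact ih (c :: cur) acc h w hw

-- hence A's empty-term filter is the identity on query.split()
theorem pv_len_ofList (w : List Char) : PySem.Str.len (String.ofList w) = w.length := by
  simp [PySem.Str.len]

theorem pv_filter_split₀ (q : String) :
    (PySem.Str.split₀ q).filter (fun term => PySem.Str.len term != 0) = PySem.Str.split₀ q := by
  apply List.filter_eq_self.mpr
  intro t ht
  simp only [PySem.Str.split₀] at ht
  rcases List.mem_map.mp ht with ⟨w, hw, rfl⟩
  have hne : w ≠ [] := pv_go_ne_nil q.toList [] [] (by simp) w hw
  simp only [bne_iff_ne, ne_eq, pv_len_ofList]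
  intro h0
  have h1 : w.length = 0 := by exact_mod_cast h0
  exact hne (List.eq_nil_of_length_eq_zero h1)

-- ===== VERDICT (by name: the statement is the Claim_ definition above) =====
set_option maxHeartbeats 1000000 in
theorem query_score_py_spec : Claim_equal_query_score_py := by
  intro query text _
  unfold Spec_query_score_py query_score_py query_score_py_alt
  by_cases h0 : (PySem.Str.len query == 0 || PySem.Str.len text == 0) = true
  · rw [if_pos h0, if_pos h0]
  · rw [if_neg h0, if_neg h0]
    simp only [pv_filter_split₀, pv_foldl_two, pvGo_eq]
    split_ifs <;> omega
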